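-- pv_equiv track=rewrite | github.com/ArtComputerSE/bowling | src/bowling.py | split_into_pairs
-- ===== SOURCE A (Python) =====
-- def split_into_pairs(seq):
--     le = len(seq) // 2
--     if le > 10:
--         raise Exception("Too long sequence: {seq}")
--     pairs = list()
--
--     while seq:
--         if len(pairs) == 9:
--             pairs.append(seq[:])
--             break
--         else:
--             pairs.append(seq[:2])
--         seq = seq[2:]
--     return pairs
-- ===== SOURCE B (Python) =====
-- def split_into_pairs(seq):
--     if len(seq) // 2 > 10:
--         raise Exception("Too long sequence: {seq}")
--     pairs = [seq[i:i + 2] for i in range(0, min(len(seq), 18), 2)]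
--     if len(seq) > 18:
--         pairs.append(seq[18:])
--     return pairs
-- ===== Notes on version B (the rewrite author's own statement) =====
-- stated objective: simpler
-- what changed: Replaces A's interleaved while-loop (pair counter checked each iteration, seq repeatedly resliced with seq[2:]) by a direct indexed slicing pass over positions 0,2,...,16 plus one separate remainder check for seq[18:].
import Mathlib
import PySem

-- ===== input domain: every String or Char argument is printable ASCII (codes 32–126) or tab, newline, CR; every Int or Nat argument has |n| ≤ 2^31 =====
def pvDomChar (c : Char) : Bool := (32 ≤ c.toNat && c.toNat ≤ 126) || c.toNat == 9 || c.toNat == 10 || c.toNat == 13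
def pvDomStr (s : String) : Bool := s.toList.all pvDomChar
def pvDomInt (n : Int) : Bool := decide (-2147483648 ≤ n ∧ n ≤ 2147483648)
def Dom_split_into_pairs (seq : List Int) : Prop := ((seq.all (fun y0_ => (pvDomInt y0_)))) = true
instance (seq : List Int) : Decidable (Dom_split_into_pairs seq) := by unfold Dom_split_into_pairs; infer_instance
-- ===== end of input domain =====

-- B replaces A's interleaved while-loop (counter check + repeated seq[2:] reslicing) with a
-- direct indexed slicing pass over positions 0,2,…,16 followed by one remainder check (objective: simpler).

-- ===== PORT A =====
-- the 'while seq:' loop; terminates because seq[2:] is strictly shorter than a non-empty seq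
def pvA_loop (seq : List Int) (pairs : List (List Int)) : List (List Int) :=
  if h : seq = [] then pairs
  else if pairs.length == 9 then
    pairs ++ [PySem.List.slice seq none none]
  else
    pvA_loop (PySem.List.slice seq (some 2) none) (pairs ++ [PySem.List.slice seq none (some 2)])
termination_by seq.length
decreasing_by
  simp [pysem]
  cases seq with
  | nil => exact absurd rfl h
  | cons x t => simp

-- the 'if le > 10: raise Exception(...)' guard raises; those inputs are excluded by Pre_split_into_pairs
def split_into_pairs (seq : List Int) : List (List Int) :=
  pvA_loop seq []

-- ===== PORT B =====
def split_into_pairs_alt (seq : List Int) : List (List Int) :=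
  let pairs := (PySem.List.pyRange 0 (min (seq.length : Int) 18) 2).map
      (fun i => PySem.List.slice seq (some i) (some (i + 2)))
  if (seq.length : Int) > 18 then pairs ++ [PySem.List.slice seq (some 18) none] else pairs

-- ===== PRECONDITION & SPEC =====
-- Pre_ excludes exactly the inputs on which A raises: len(seq)//2 > 10, i.e. len(seq) ≥ 22.
def Pre_split_into_pairs (seq : List Int) : Prop := seq.length ≤ 21
instance (seq : List Int) : Decidable (Pre_split_into_pairs seq) := by
  unfold Pre_split_into_pairs; infer_instance
def pvWitness_split_into_pairs : List Int := [1, 2, 3, 4, 5]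

def Spec_split_into_pairs (seq : List Int) (out : List (List Int)) : Prop := out = split_into_pairs_alt seq
instance (seq : List Int) (out : List (List Int)) : Decidable (Spec_split_into_pairs seq out) := by unfold Spec_split_into_pairs; infer_instance

-- ===== CLAIM (what is proved, stated in full; the proofs are below) =====
def Claim_equal_split_into_pairs : Prop := ∀ (seq : List Int), Dom_split_into_pairs seq → Pre_split_into_pairs seq → Spec_split_into_pairs seq (split_into_pairs seq)

-- ===== LEMMAS AND PROOFS =====

-- what A's loop builds past the initial accumulator: up to n two-element chunks, then the rest as one block
def pvChunks : Nat → List Int → List (List Int)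
  | _, [] => []
  | 0, a :: t => [a :: t]
  | n+1, a :: t => (a :: t).take 2 :: pvChunks n ((a :: t).drop 2)

-- the pure two-element-chunk part (what B's comprehension builds)
def pvPairsT : Nat → List Int → List (List Int)
  | 0, _ => []
  | _+1, [] => []
  | n+1, a :: t => (a :: t).take 2 :: pvPairsT n ((a :: t).drop 2)

theorem pv_slice_drop2 (seq : List Int) : PySem.List.slice seq (some 2) none = seq.drop 2 := by
  simpa using PySem.List.slice_from_natCast seq 2

theorem pv_slice_take2 (seq : List Int) : PySem.List.slice seq none (some 2) = seq.take 2 := by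
  simpa using PySem.List.slice_to_natCast seq 2

theorem pvA_loop_eq (seq : List Int) (pairs : List (List Int)) :
    pairs.length ≤ 9 → pvA_loop seq pairs = pairs ++ pvChunks (9 - pairs.length) seq := by
  fun_induction pvA_loop seq pairs with
  | case1 pairs =>
      intro _
      simp [pvChunks]
  | case2 seq pairs hnil h9 =>
      intro h
      cases seq with
      | nil => exact absurd rfl hnil
      | cons a t =>
          simp at h9
          simp [h9, pvChunks, PySem.List.slice_none_none]
  | case3 seq pairs hnil h9 ih =>
      intro h
      cases seq with
      | nil => exact absurd rfl hnil
      | cons a t =>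
          simp at h9
          have hlt : pairs.length < 9 := lt_of_le_of_ne h h9
          rw [ih (by simp; omega)]
          have h1 : 9 - (pairs ++ [PySem.List.slice (a :: t) none (some 2)]).length
              = (9 - pairs.length) - 1 := by simp; omega
          have h2 : 9 - pairs.length = ((9 - pairs.length) - 1) + 1 := by omega
          rw [h1, h2, pv_slice_drop2, pv_slice_take2]
          simp [pvChunks]

theorem pvChunks_eq (n : Nat) (seq : List Int) :
    pvChunks n seq = pvPairsT n seq ++ (if 2 * n < seq.length then [seq.drop (2 * n)] else []) := by
  induction n generalizing seq with
  | zero => cases seq <;> simp [pvChunks, pvPairsT]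
  | succ n ih =>
      cases seq with
      | nil => simp [pvChunks, pvPairsT]
      | cons a t =>
          rw [pvChunks, pvPairsT, ih]
          have hdrop : ((a :: t).drop 2).drop (2 * n) = (a :: t).drop (2 * (n + 1)) := by
            rw [List.drop_drop]; congr 1; omega
          by_cases hc : 2 * (n + 1) < (a :: t).length
          · rw [if_pos (show 2 * n < ((a :: t).drop 2).length by simp at hc ⊢; omega),
                if_pos hc, hdrop]
            simp
          · rw [if_neg (show ¬ 2 * n < ((a :: t).drop 2).length by simp at hc ⊢; omega),
                if_neg hc]
            simp

theorem pv_slice_pair (seq : List Int) (k : Nat) :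
    PySem.List.slice seq (some (2 * (k : Int))) (some (2 * (k : Int) + 2))
      = (seq.drop (2 * k)).take 2 := by
  have h := PySem.List.slice_natCast seq (2 * k) (2 * k + 2)
  have e1 : ((2 * k : Nat) : Int) = 2 * (k : Int) := by push_cast; ring
  have e2 : ((2 * k + 2 : Nat) : Int) = 2 * (k : Int) + 2 := by push_cast; ring
  rw [e1, e2] at h
  simpa using h

theorem pvPairsT_range (n : Nat) (seq : List Int) :
    (List.range (min ((seq.length + 1) / 2) n)).map (fun k => (seq.drop (2 * k)).take 2)
      = pvPairsT n seq := by
  induction n generalizing seq with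
  | zero => simp [pvPairsT]
  | succ n ih =>
      cases seq with
      | nil => simp [pvPairsT]
      | cons a t =>
          have hm : min (((a :: t).length + 1) / 2) (n + 1)
              = min ((((a :: t).drop 2).length + 1) / 2) n + 1 := by
            simp; omega
          rw [hm, List.range_succ_eq_map, List.map_cons, List.map_map]
          have hfun : ((fun k => ((a :: t).drop (2 * k)).take 2) ∘ Nat.succ)
              = fun k => (((a :: t).drop 2).drop (2 * k)).take 2 := by
            funext k
            simp only [Function.comp_apply, List.drop_drop]
            congr 2
            omega
          rw [hfun, ih, pvPairsT]
          simp

theorem pv_alt_eq (seq : List Int) :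
    split_into_pairs_alt seq
      = pvPairsT 9 seq ++ (if 2 * 9 < seq.length then [seq.drop (2 * 9)] else []) := by
  unfold split_into_pairs_alt
  have hmin : min ((seq.length : Int)) 18 = ((min seq.length 18 : Nat) : Int) := by
    push_cast; rfl
  have hT : (if (0 : Int) < ((min seq.length 18 : Nat) : Int)
        then ((((min seq.length 18 : Nat) : Int) - 0 + 2 - 1) / 2).toNat else 0)
      = min ((seq.length + 1) / 2) 9 := by
    by_cases h0 : 0 < min seq.length 18
    · have : (0 : Int) < ((min seq.length 18 : Nat) : Int) := by exact_mod_cast h0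
      rw [if_pos this]
      have : (((min seq.length 18 : Nat) : Int) - 0 + 2 - 1) / 2
          = (((min seq.length 18 + 1) / 2 : Nat) : Int) := by
        push_cast
        omega
      rw [this]
      simp
      omega
    · have h0' : min seq.length 18 = 0 := by omega
      rw [h0']
      simp
      omega
  rw [hmin, PySem.List.pyRange_of_pos 0 _ (by norm_num : (0:Int) < 2), hT, List.map_map]
  have hfun : ((fun i => PySem.List.slice seq (some i) (some (i + 2))) ∘ fun k : Nat => 0 + 2 * (k : Int))
      = fun k : Nat => (seq.drop (2 * k)).take 2 := by
    funext k
    simp only [Function.comp_apply, zero_add]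
    exact pv_slice_pair seq k
  rw [hfun, pvPairsT_range]
  have h18 : PySem.List.slice seq (some 18) none = seq.drop (2 * 9) := by
    simpa using PySem.List.slice_from_natCast seq 18
  by_cases hc : 2 * 9 < seq.length
  · rw [if_pos (show (seq.length : Int) > 18 by exact_mod_cast hc), if_pos hc, h18]
  · rw [if_neg (show ¬ (seq.length : Int) > 18 by exact_mod_cast hc), if_neg hc]
    simp

-- ===== VERDICT (by name: the statement is the Claim_ definition above) =====
theorem split_into_pairs_spec : Claim_equal_split_into_pairs := by
  intro seq _ _
  unfold Spec_split_into_pairs split_into_pairs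
  rw [pvA_loop_eq seq [] (by simp), pv_alt_eq, pvChunks_eq]
  simp
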